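-- pv_equiv track=rewrite | github.com/PixelatedStarfish/Colas-Enumeration | Cola's Enumeration/src/illionConverter.py | llion
-- ===== SOURCE A (Python) =====
-- ISOLATE = ['ni', 'mi', 'bi', 'tri', 'quadri',
--            'quinti', 'sexti', 'septi', 'octi', 'noni']
--
-- CW_UNI = ['', 'un', 'duo', 'tre', 'quattuor', 'quin', 'se',
--           'septe', 'octo', 'nove']  # quinqua is changed to quin
--
-- TEN = ['', 'deci', 'viginti', 'triginta', 'quadraginta', 'quinquaginta',
--        'sexaginta', 'septuaginta', 'octoginta', 'nonaginta']
--
-- HUN = ['', 'centi', 'ducenti', 'trecenti', 'quadringenti',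
--        'quingenti', 'sescenti', 'septingenti', 'octingenti', 'nongenti']
--
-- SIMP_UNI = ['', 'un', 'duo', 'tre', 'quattuor',
--             'quin', 'sex', 'septen', 'octo', 'novem']
--
-- PREC_TEN = ['', 'N', 'MS', 'NS', 'NS', 'NS', 'N', 'N', 'MX', '']
--
-- PREC_HUN = ['', 'NX', 'N', 'NS', 'NS', 'NS', 'N', 'N', 'MX', '']
--
-- def llion(n, modified = False):
--     if n < 1:
--         return 'N<1 is not defined'
--     name = ''
--     while n > 999:
--         name = concat(n % 1000, name, modified)
--         n = n // 1000
--     name = concat(n, name, modified)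
--     return name
--
-- def concat(n, suffix, modified):
--     result = base(n, modified) + suffix
--     if suffix == '':
--         result += 'on'
--     return result
--
-- def base(n, modified):
--     if n < 10:
--         return ISOLATE[n] + 'lli'
--     unit = n % 10
--     ten = (n//10) % 10
--     hun = n//100
--     if ten == 0:
--         prec = PREC_HUN[hun]
--     else:
--         prec = PREC_TEN[ten]
--     if modified:
--         name = SIMP_UNI[unit]
--     else:
--         name = CW_UNI[unit]
--         if unit == 3 or unit == 6:
--             if 'S' in prec:
--                 name += 's'
--             if 'X' in prec:
--                 if unit == 3:
--                     name = 'tres'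
--                 else:
--                     name = 'sex'
--         if unit == 7 or unit == 9:
--             if 'M' in prec:
--                 name += 'm'
--             if 'N' in prec:
--                 name += 'n'
--     name += TEN[ten]
--     name += HUN[hun]
--     return name[:-1] + 'illi'  # Replace the final vowel
-- ===== SOURCE B (Python) =====
-- # Simpler: euphonic-ligature branch cascade replaced by a data table (LIG) consulted
-- # in one join, and A's suffix-prepending while-loop with its suffix=='' check replaced
-- # by a plain high-to-low recursion with 'on' appended once at the top.
-- ISOLATE = ['ni', 'mi', 'bi', 'tri', 'quadri',
--            'quinti', 'sexti', 'septi', 'octi', 'noni']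
--
-- CW_UNI = ['', 'un', 'duo', 'tre', 'quattuor', 'quin', 'se',
--           'septe', 'octo', 'nove']  # quinqua is changed to quin
--
-- TEN = ['', 'deci', 'viginti', 'triginta', 'quadraginta', 'quinquaginta',
--        'sexaginta', 'septuaginta', 'octoginta', 'nonaginta']
--
-- HUN = ['', 'centi', 'ducenti', 'trecenti', 'quadringenti',
--        'quingenti', 'sescenti', 'septingenti', 'octingenti', 'nongenti']
--
-- SIMP_UNI = ['', 'un', 'duo', 'tre', 'quattuor',
--             'quin', 'sex', 'septen', 'octo', 'novem']
--
-- PREC_TEN = ['', 'N', 'MS', 'NS', 'NS', 'NS', 'N', 'N', 'MX', '']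
--
-- PREC_HUN = ['', 'NX', 'N', 'NS', 'NS', 'NS', 'N', 'N', 'MX', '']
--
-- # ligature letter appended to the unit word, per unit digit and precedence marker
-- LIG = {3: {'S': 's', 'X': 's'},
--        6: {'S': 's', 'X': 'x'},
--        7: {'M': 'm', 'N': 'n'},
--        9: {'M': 'm', 'N': 'n'}}
--
-- def llion(n, modified=False):
--     if n < 1:
--         return 'N<1 is not defined'
--     return _name(n, modified) + 'on'
--
-- def _name(n, modified):
--     if n == 0:
--         return ''
--     return _name(n // 1000, modified) + _group(n % 1000, modified)
--
-- def _group(g, modified):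
--     if g < 10:
--         return ISOLATE[g] + 'lli'
--     u, t, h = g % 10, g // 10 % 10, g // 100
--     prec = PREC_TEN[t] if t else PREC_HUN[h]
--     if modified:
--         stem = SIMP_UNI[u]
--     else:
--         lig = LIG.get(u, {})
--         stem = CW_UNI[u] + ''.join(lig[c] for c in prec if c in lig)
--     return (stem + TEN[t] + HUN[h])[:-1] + 'illi'
-- ===== Notes on version B (the rewrite author's own statement) =====
-- stated objective: simpler
-- what changed: The euphonic-ligature branch cascade in base() (the unit==3/6/7/9 ifs testing 'S'/'X'/'M'/'N' in prec) is replaced by a data table LIG consulted with one join, and A's suffix-prepending while-loop with its suffix=='' check inside concat() is replaced by a plain high-to-low recursion that appends each group's name and adds 'on' once at the top; concat() disappears.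
import Mathlib
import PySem

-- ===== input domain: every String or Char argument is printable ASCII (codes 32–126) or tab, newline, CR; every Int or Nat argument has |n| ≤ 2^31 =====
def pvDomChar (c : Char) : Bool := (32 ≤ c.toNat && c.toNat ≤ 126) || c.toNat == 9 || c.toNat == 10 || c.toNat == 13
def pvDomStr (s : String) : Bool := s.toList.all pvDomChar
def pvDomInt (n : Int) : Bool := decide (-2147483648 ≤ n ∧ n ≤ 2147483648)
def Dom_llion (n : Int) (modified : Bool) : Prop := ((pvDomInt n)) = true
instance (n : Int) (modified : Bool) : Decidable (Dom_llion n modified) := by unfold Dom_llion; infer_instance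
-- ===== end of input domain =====

-- B replaces A's euphonic-ligature branch cascade by a data table consulted with one join,
-- and A's suffix-prepending while-loop (with the suffix=='' check inside concat) by a plain
-- high-to-low recursion that appends 'on' once at the top.

-- ===== PORT A =====
-- tables of Source A
def ISOLATE : List String := ["ni", "mi", "bi", "tri", "quadri", "quinti", "sexti", "septi", "octi", "noni"]
def CW_UNI : List String := ["", "un", "duo", "tre", "quattuor", "quin", "se", "septe", "octo", "nove"]
def TEN : List String := ["", "deci", "viginti", "triginta", "quadraginta", "quinquaginta", "sexaginta", "septuaginta", "octoginta", "nonaginta"]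
def HUN : List String := ["", "centi", "ducenti", "trecenti", "quadringenti", "quingenti", "sescenti", "septingenti", "octingenti", "nongenti"]
def SIMP_UNI : List String := ["", "un", "duo", "tre", "quattuor", "quin", "sex", "septen", "octo", "novem"]
def PREC_TEN : List String := ["", "N", "MS", "NS", "NS", "NS", "N", "N", "MX", ""]
def PREC_HUN : List String := ["", "NX", "N", "NS", "NS", "NS", "N", "N", "MX", ""]

-- the 'name' computed by base()'s if modified/else cascade, extracted verbatim as a helper
def pyStem (unit : Int) (prec : String) (modified : Bool) : String :=
  if modified then PySem.List.pyGetD SIMP_UNI unit ""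
  else
    let name := PySem.List.pyGetD CW_UNI unit ""
    let name :=
      if unit = 3 ∨ unit = 6 then
        let name := if PySem.Str.isIn "S" prec then name ++ "s" else name
        if PySem.Str.isIn "X" prec then (if unit = 3 then "tres" else "sex") else name
      else name
    if unit = 7 ∨ unit = 9 then
      let name := if PySem.Str.isIn "M" prec then name ++ "m" else name
      if PySem.Str.isIn "N" prec then name ++ "n" else name
    else name

-- helper base(n, modified) of Source A.  List indices are always in range on the calls llion
-- makes (0 ≤ n ≤ 999), so the pyGetD default "" is never consulted.
def pyBase (n : Int) (modified : Bool) : String :=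
  if n < 10 then PySem.List.pyGetD ISOLATE n "" ++ "lli"
  else
    let unit := PySem.Int.mod n 10
    let ten := PySem.Int.mod (PySem.Int.floordiv n 10) 10
    let hun := PySem.Int.floordiv n 100
    let prec := if ten = 0 then PySem.List.pyGetD PREC_HUN hun ""
                else PySem.List.pyGetD PREC_TEN ten ""
    let name := pyStem unit prec modified
    let name := name ++ PySem.List.pyGetD TEN ten ""
    let name := name ++ PySem.List.pyGetD HUN hun ""
    PySem.Str.slice name none (some (-1)) ++ "illi"  -- name[:-1] + 'illi'

-- helper concat(n, suffix, modified) of Source A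
def pyConcat (n : Int) (suffix : String) (modified : Bool) : String :=
  let result := pyBase n modified ++ suffix
  if suffix = "" then result ++ "on" else result

-- the 'while n > 999' loop of Source A followed by its final concat
def llionLoop (n : Int) (name : String) (modified : Bool) : String :=
  if n > 999 then
    llionLoop (PySem.Int.floordiv n 1000) (pyConcat (PySem.Int.mod n 1000) name modified) modified
  else pyConcat n name modified
termination_by n.toNat
decreasing_by
  rename_i h
  rw [PySem.Int.floordiv_eq_ediv_of_pos (by norm_num)]
  omega

def llion (n : Int) (modified : Bool) : String :=
  if n < 1 then "N<1 is not defined" else llionLoop n "" modified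

-- ===== PORT B =====
-- the ligature table LIG of Source B
def LIG : PySem.Dict Int (PySem.Dict Char String) :=
  PySem.Dict.ofList
    [(3, PySem.Dict.ofList [('S', "s"), ('X', "s")]),
     (6, PySem.Dict.ofList [('S', "s"), ('X', "x")]),
     (7, PySem.Dict.ofList [('M', "m"), ('N', "n")]),
     (9, PySem.Dict.ofList [('M', "m"), ('N', "n")])]

-- the stem of _group(): SIMP_UNI[u] if modified, else CW_UNI[u] plus the joined ligature letters
def altStem (u : Int) (prec : String) (modified : Bool) : String :=
  if modified then PySem.List.pyGetD SIMP_UNI u ""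
  else
    let lig := PySem.Dict.getD LIG u PySem.Dict.empty
    PySem.List.pyGetD CW_UNI u "" ++
      PySem.Str.join "" (prec.toList.filterMap (fun c => PySem.Dict.get? lig c))

-- helper _group(g, modified) of Source B
def altGroup (g : Int) (modified : Bool) : String :=
  if g < 10 then PySem.List.pyGetD ISOLATE g "" ++ "lli"
  else
    let u := PySem.Int.mod g 10
    let t := PySem.Int.mod (PySem.Int.floordiv g 10) 10
    let h := PySem.Int.floordiv g 100
    let prec := if t ≠ 0 then PySem.List.pyGetD PREC_TEN t ""
                else PySem.List.pyGetD PREC_HUN h ""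
    PySem.Str.slice (altStem u prec modified ++ PySem.List.pyGetD TEN t "" ++ PySem.List.pyGetD HUN h "")
      none (some (-1)) ++ "illi"

-- helper _name(n, modified) of Source B (its guard 'n == 0' is written 'n ≤ 0' for termination;
-- identical on every call Source B makes, since _name is only reached with n ≥ 0)
def altName (n : Int) (modified : Bool) : String :=
  if n ≤ 0 then ""
  else altName (PySem.Int.floordiv n 1000) modified ++ altGroup (PySem.Int.mod n 1000) modified
termination_by n.toNat
decreasing_by
  rename_i h
  rw [PySem.Int.floordiv_eq_ediv_of_pos (by norm_num)]
  omega

def llion_alt (n : Int) (modified : Bool) : String :=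
  if n < 1 then "N<1 is not defined" else altName n modified ++ "on"

-- ===== PRECONDITION & SPEC =====
def Spec_llion (n : Int) (modified : Bool) (out : String) : Prop := out = llion_alt n modified
instance (n : Int) (modified : Bool) (out : String) : Decidable (Spec_llion n modified out) := by unfold Spec_llion; infer_instance

-- ===== CLAIM (what is proved, stated in full; the proofs are below) =====
def Claim_equal_llion : Prop := ∀ (n : Int) (modified : Bool), Dom_llion n modified → Spec_llion n modified (llion n modified)

-- ===== LEMMAS AND PROOFS =====

theorem append_ne_empty (s t : String) (ht : t ≠ "") : s ++ t ≠ "" := by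
  intro h
  have h' := congrArg String.toList h
  simp [String.toList_append] at h'
  exact ht (String.toList_inj.mp (by simp [h'.2]))

theorem on_ne_empty : ("on" : String) ≠ "" := by decide

-- the precedence tables only ever yield these six strings
theorem prec_ten_mem (i : Int) (h0 : 0 ≤ i) (h9 : i ≤ 9) :
    PySem.List.pyGetD PREC_TEN i "" ∈ (["", "N", "MS", "NS", "MX", "NX"] : List String) := by
  interval_cases i <;> decide

theorem prec_hun_mem (i : Int) (h0 : 0 ≤ i) (h9 : i ≤ 9) :
    PySem.List.pyGetD PREC_HUN i "" ∈ (["", "N", "MS", "NS", "MX", "NX"] : List String) := by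
  interval_cases i <;> decide

-- A's branch cascade and B's table join agree on every unit digit and precedence marker
theorem stem_eq (u : Int) (h0 : 0 ≤ u) (h9 : u ≤ 9) (prec : String)
    (hp : prec ∈ (["", "N", "MS", "NS", "MX", "NX"] : List String)) (modified : Bool) :
    pyStem u prec modified = altStem u prec modified := by
  interval_cases u <;> fin_cases hp <;> cases modified <;> decide

-- the two group renderers agree on every three-digit group
theorem base_eq (g : Int) (h0 : 0 ≤ g) (h999 : g ≤ 999) (modified : Bool) :
    pyBase g modified = altGroup g modified := by
  unfold pyBase altGroup
  by_cases h10 : g < 10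
  · rw [if_pos h10, if_pos h10]
  · rw [if_neg h10, if_neg h10]
    have hu0 := PySem.Int.mod_nonneg g (b := 10) (by norm_num)
    have hu9 := PySem.Int.mod_lt g (b := 10) (by norm_num)
    have ht0 := PySem.Int.mod_nonneg (PySem.Int.floordiv g 10) (b := 10) (by norm_num)
    have ht9 := PySem.Int.mod_lt (PySem.Int.floordiv g 10) (b := 10) (by norm_num)
    have hh := PySem.Int.floordiv_eq_ediv_of_pos (a := g) (show (0:Int) < 100 by norm_num)
    have hh0 : 0 ≤ PySem.Int.floordiv g 100 := by rw [hh]; omega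
    have hh9 : PySem.Int.floordiv g 100 ≤ 9 := by rw [hh]; omega
    have hprec : (if PySem.Int.mod (PySem.Int.floordiv g 10) 10 = 0
            then PySem.List.pyGetD PREC_HUN (PySem.Int.floordiv g 100) ""
            else PySem.List.pyGetD PREC_TEN (PySem.Int.mod (PySem.Int.floordiv g 10) 10) "") =
          (if PySem.Int.mod (PySem.Int.floordiv g 10) 10 ≠ 0
            then PySem.List.pyGetD PREC_TEN (PySem.Int.mod (PySem.Int.floordiv g 10) 10) ""
            else PySem.List.pyGetD PREC_HUN (PySem.Int.floordiv g 100) "") := by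
      by_cases ht : PySem.Int.mod (PySem.Int.floordiv g 10) 10 = 0 <;> simp [*]
    have hmem : (if PySem.Int.mod (PySem.Int.floordiv g 10) 10 = 0
            then PySem.List.pyGetD PREC_HUN (PySem.Int.floordiv g 100) ""
            else PySem.List.pyGetD PREC_TEN (PySem.Int.mod (PySem.Int.floordiv g 10) 10) "") ∈
          (["", "N", "MS", "NS", "MX", "NX"] : List String) := by
      by_cases ht : PySem.Int.mod (PySem.Int.floordiv g 10) 10 = 0
      · rw [if_pos ht]; exact prec_hun_mem _ hh0 hh9
      · rw [if_neg ht]; exact prec_ten_mem _ ht0 (by omega)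
    simp only []
    rw [← hprec, stem_eq _ hu0 (by omega) _ hmem]

theorem altName_zero (modified : Bool) : altName 0 modified = "" := by
  rw [altName]; norm_num

-- A's loop with a nonempty suffix equals B's recursion followed by that suffix
theorem loop_eq_name (k : Nat) : ∀ (n : Int), n.toNat ≤ k → 0 < n →
    ∀ (s : String) (modified : Bool), s ≠ "" →
    llionLoop n s modified = altName n modified ++ s := by
  induction k with
  | zero => intro n hk hn; omega
  | succ k ih =>
    intro n hk hn s modified hs
    have hdiv := PySem.Int.floordiv_eq_ediv_of_pos (a := n) (show (0:Int) < 1000 by norm_num)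
    have hmod := PySem.Int.mod_eq_emod_of_pos (a := n) (show (0:Int) < 1000 by norm_num)
    have hm0 : 0 ≤ PySem.Int.mod n 1000 := by rw [hmod]; omega
    have hm999 : PySem.Int.mod n 1000 ≤ 999 := by rw [hmod]; omega
    by_cases hbig : n > 999
    · rw [llionLoop, if_pos hbig, altName, if_neg (by omega)]
      have hq : 0 < PySem.Int.floordiv n 1000 := by rw [hdiv]; omega
      have hqk : (PySem.Int.floordiv n 1000).toNat ≤ k := by rw [hdiv]; omega
      rw [show pyConcat (PySem.Int.mod n 1000) s modified = pyBase (PySem.Int.mod n 1000) modified ++ s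
            from by unfold pyConcat; simp [hs],
          ih _ hqk hq _ modified (append_ne_empty _ _ hs),
          base_eq _ hm0 hm999, String.append_assoc]
    · rw [llionLoop, if_neg hbig, altName, if_neg (by omega)]
      have hq0 : PySem.Int.floordiv n 1000 = 0 := by rw [hdiv]; omega
      have hm : PySem.Int.mod n 1000 = n := by rw [hmod]; omega
      rw [hq0, altName_zero, hm,
          show pyConcat n s modified = pyBase n modified ++ s from by unfold pyConcat; simp [hs],
          base_eq _ (by omega) (by omega)]
      simp

-- ===== VERDICT (by name: the statement is the Claim_ definition above) =====
theorem llion_spec : Claim_equal_llion := by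
  intro n modified _
  unfold Spec_llion llion llion_alt
  by_cases hn : n < 1
  · rw [if_pos hn, if_pos hn]
  · rw [if_neg hn, if_neg hn]
    have hpos : 0 < n := by omega
    have hdiv := PySem.Int.floordiv_eq_ediv_of_pos (a := n) (show (0:Int) < 1000 by norm_num)
    have hmod := PySem.Int.mod_eq_emod_of_pos (a := n) (show (0:Int) < 1000 by norm_num)
    have hm0 : 0 ≤ PySem.Int.mod n 1000 := by rw [hmod]; omega
    have hm999 : PySem.Int.mod n 1000 ≤ 999 := by rw [hmod]; omega
    by_cases hbig : n > 999
    · rw [llionLoop, if_pos hbig, altName, if_neg (by omega)]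
      have hq : 0 < PySem.Int.floordiv n 1000 := by rw [hdiv]; omega
      rw [show pyConcat (PySem.Int.mod n 1000) "" modified = pyBase (PySem.Int.mod n 1000) modified ++ "on"
            from by unfold pyConcat; simp,
          loop_eq_name (PySem.Int.floordiv n 1000).toNat _ le_rfl hq _ modified
            (append_ne_empty _ _ on_ne_empty),
          base_eq _ hm0 hm999, String.append_assoc]
    · rw [llionLoop, if_neg hbig, altName, if_neg (by omega)]
      have hq0 : PySem.Int.floordiv n 1000 = 0 := by rw [hdiv]; omega
      have hm : PySem.Int.mod n 1000 = n := by rw [hmod]; omega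
      rw [hq0, altName_zero, hm,
          show pyConcat n "" modified = pyBase n modified ++ "on" from by unfold pyConcat; simp,
          base_eq _ (by omega) (by omega)]
      simp
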